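-- pv_equiv track=rewrite | github.com/norbertFejer/AFE_Project | src/dataset.py | parse_standard_resolution
-- ===== SOURCE A (Python) =====
-- def parse_standard_resolution(x_max, y_max):
--     """ Parses an appropriate screen resolution
--
--         Parameters:
--             x_max (int): maximum x coordinate
--             y_max (int): maximum y coordinate
--
--         Returns:
--             x_std (int), y_std(int): standard screen resolution
--     """
--     x_standard = [320, 360, 480, 720, 768, 1024, 1280, 1360, 1366, 1440, 1600, 1680, 1920]
--     y_standard = [480, 568, 640, 720, 768, 800, 900, 1024, 1050, 1080, 1200, 1280]
--
--     # Parsing x coordinate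
--     x_pos = 0
--     while x_standard[x_pos] < x_max and x_pos < len(x_standard) - 1:
--         x_pos += 1
--
--     # Parsing y coordinate
--     y_pos = 0
--     while y_standard[y_pos] < y_max and y_pos < len(y_standard) - 1:
--         y_pos += 1
--
--     if x_max > x_standard[x_pos]:
--         x_standard[x_pos] = x_max
--
--     if y_max > y_standard[y_pos]:
--         y_standard[y_pos] = y_max
--
--     return x_standard[x_pos], y_standard[y_pos]
-- ===== SOURCE B (Python) =====
-- def parse_standard_resolution(x_max, y_max):
--     """Smallest standard resolution >= the given dimensions (binary search;
--     falls back to the requested dimension when it exceeds every standard value)."""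
--     x_standard = [320, 360, 480, 720, 768, 1024, 1280, 1360, 1366, 1440, 1600, 1680, 1920]
--     y_standard = [480, 568, 640, 720, 768, 800, 900, 1024, 1050, 1080, 1200, 1280]
--
--     def pick(vals, v):
--         lo, hi = 0, len(vals)
--         while lo < hi:
--             mid = (lo + hi) // 2
--             if vals[mid] < v:
--                 lo = mid + 1
--             else:
--                 hi = mid
--         return vals[lo] if lo < len(vals) else v
--
--     return pick(x_standard, x_max), pick(y_standard, y_max)
-- ===== Notes on version B (the rewrite author's own statement) =====
-- stated objective: idiomatic
-- what changed: Replaces each linear while-loop scan plus in-place element overwrite with a bisect-left binary search over the sorted constant list, returning the found entry or falling back to the requested dimension when it exceeds every entry.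
import Mathlib
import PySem

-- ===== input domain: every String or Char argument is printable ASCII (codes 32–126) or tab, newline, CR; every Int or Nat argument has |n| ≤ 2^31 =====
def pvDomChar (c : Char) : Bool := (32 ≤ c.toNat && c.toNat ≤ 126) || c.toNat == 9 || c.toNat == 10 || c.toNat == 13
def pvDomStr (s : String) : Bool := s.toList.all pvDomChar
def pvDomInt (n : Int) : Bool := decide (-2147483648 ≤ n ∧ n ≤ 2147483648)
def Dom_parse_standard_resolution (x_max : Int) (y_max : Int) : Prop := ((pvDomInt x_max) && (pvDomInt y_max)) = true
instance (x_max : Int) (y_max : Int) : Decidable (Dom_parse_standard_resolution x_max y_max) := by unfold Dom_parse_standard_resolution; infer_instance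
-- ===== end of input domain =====

-- B replaces A's linear while-loop scans with a bisect-left binary search over the sorted constant lists (idiomatic; return values proved equal everywhere).

-- ===== PORT A =====
-- A's while loop: advance pos while xs[pos] < v and pos < len(xs)-1.
-- Indices stay in range throughout (pos ≤ len-1), so getD is exact here.
def pvScanA (xs : List Int) (v : Int) (pos : Nat) : Nat :=
  if h : xs.getD pos 0 < v ∧ pos < xs.length - 1 then pvScanA xs v (pos + 1) else pos
termination_by xs.length - pos
decreasing_by omega

def parse_standard_resolution (x_max : Int) (y_max : Int) : Int × Int :=
  let x_standard : List Int := [320, 360, 480, 720, 768, 1024, 1280, 1360, 1366, 1440, 1600, 1680, 1920]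
  let y_standard : List Int := [480, 568, 640, 720, 768, 800, 900, 1024, 1050, 1080, 1200, 1280]
  let x_pos := pvScanA x_standard x_max 0
  let y_pos := pvScanA y_standard y_max 0
  -- the in-place write `x_standard[x_pos] = x_max` followed by the read returns x_max itself
  let x_res := if x_max > x_standard.getD x_pos 0 then x_max else x_standard.getD x_pos 0
  let y_res := if y_max > y_standard.getD y_pos 0 then y_max else y_standard.getD y_pos 0
  (x_res, y_res)

-- ===== PORT B =====
-- bisect_left as hand-written in Source B (binary search)
def pvBisectLeft (xs : List Int) (v : Int) (lo hi : Nat) : Nat :=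
  if h : lo < hi then
    let mid := (lo + hi) / 2
    if xs.getD mid 0 < v then pvBisectLeft xs v (mid + 1) hi else pvBisectLeft xs v lo mid
  else lo
termination_by hi - lo
decreasing_by all_goals omega

def pvPickB (xs : List Int) (v : Int) : Int :=
  let lo := pvBisectLeft xs v 0 xs.length
  if lo < xs.length then xs.getD lo 0 else v

def parse_standard_resolution_alt (x_max : Int) (y_max : Int) : Int × Int :=
  let x_standard : List Int := [320, 360, 480, 720, 768, 1024, 1280, 1360, 1366, 1440, 1600, 1680, 1920]
  let y_standard : List Int := [480, 568, 640, 720, 768, 800, 900, 1024, 1050, 1080, 1200, 1280]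
  (pvPickB x_standard x_max, pvPickB y_standard y_max)

-- ===== PRECONDITION & SPEC =====
def Spec_parse_standard_resolution (x_max : Int) (y_max : Int) (out : Int × Int) : Prop := out = parse_standard_resolution_alt x_max y_max
instance (x_max : Int) (y_max : Int) (out : Int × Int) : Decidable (Spec_parse_standard_resolution x_max y_max out) := by unfold Spec_parse_standard_resolution; infer_instance

-- ===== CLAIM (what is proved, stated in full; the proofs are below) =====
def Claim_equal_parse_standard_resolution : Prop := ∀ (x_max : Int) (y_max : Int), Dom_parse_standard_resolution x_max y_max → Spec_parse_standard_resolution x_max y_max (parse_standard_resolution x_max y_max)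

-- ===== LEMMAS AND PROOFS =====
-- linSpec xs v: the first element of xs that is ≥ v, or v if none exists.
def linSpec (xs : List Int) (v : Int) : Int :=
  match xs with
  | [] => v
  | a :: rest => if v ≤ a then a else linSpec rest v

theorem drop_getD_cons (xs : List Int) (pos : Nat) (h : pos < xs.length) :
    xs.drop pos = xs.getD pos 0 :: xs.drop (pos + 1) := by
  rw [List.getD_eq_getElem xs 0 h]
  exact List.drop_eq_getElem_cons h

-- A's scan-then-fix equals linSpec on the suffix from pos.
theorem scanA_pick (xs : List Int) (v : Int) (pos : Nat) (hp : pos < xs.length) :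
    (if v > xs.getD (pvScanA xs v pos) 0 then v else xs.getD (pvScanA xs v pos) 0)
      = linSpec (xs.drop pos) v := by
  induction pos using pvScanA.induct xs v with
  | case1 pos h ih =>
    rw [pvScanA, dif_pos h, drop_getD_cons xs pos hp, linSpec]
    rw [if_neg (show ¬ v ≤ xs.getD pos 0 by omega)]
    exact ih (by omega)
  | case2 pos h =>
    rw [pvScanA, dif_neg h]
    rw [drop_getD_cons xs pos hp, linSpec]
    by_cases hv : v ≤ xs.getD pos 0
    · rw [if_pos hv, if_neg (by omega)]
    · rw [if_neg hv, if_pos (by omega)]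
      have hpos : ¬ pos < xs.length - 1 := fun hlt => h ⟨by omega, hlt⟩
      have hnil : xs.drop (pos + 1) = [] := List.drop_eq_nil_of_le (by omega)
      rw [hnil, linSpec]

theorem sorted_getD_mono (xs : List Int) (hs : xs.Pairwise (· ≤ ·))
    {i j : Nat} (hij : i ≤ j) (hj : j < xs.length) :
    xs.getD i 0 ≤ xs.getD j 0 := by
  rw [List.getD_eq_getElem xs 0 (by omega), List.getD_eq_getElem xs 0 hj]
  rcases Nat.lt_or_ge i j with h | h
  · exact List.pairwise_iff_getElem.mp hs i j (by omega) hj h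
  · have : i = j := by omega
    subst this; exact le_refl _

theorem bisect_inv (xs : List Int) (v : Int) (hs : xs.Pairwise (· ≤ ·)) :
    ∀ lo hi : Nat, hi ≤ xs.length → lo ≤ hi →
      (∀ i : Nat, i < lo → i < xs.length → xs.getD i 0 < v) →
      (∀ i : Nat, hi ≤ i → i < xs.length → v ≤ xs.getD i 0) →
      pvBisectLeft xs v lo hi ≤ xs.length ∧
      (∀ i : Nat, i < pvBisectLeft xs v lo hi → i < xs.length → xs.getD i 0 < v) ∧
      (pvBisectLeft xs v lo hi < xs.length → v ≤ xs.getD (pvBisectLeft xs v lo hi) 0) := by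
  intro lo hi
  induction lo, hi using pvBisectLeft.induct xs v with
  | case1 lo hi h mid hmid ih =>
    intro hhi hlohi hlow hhigh
    simp only [show mid = (lo + hi) / 2 from rfl] at hmid ih
    rw [pvBisectLeft, dif_pos h]
    simp only []
    rw [if_pos hmid]
    refine ih hhi (by omega) ?_ hhigh
    intro i hi1 hi2
    calc xs.getD i 0 ≤ xs.getD ((lo + hi) / 2) 0 :=
          sorted_getD_mono xs hs (by omega) (by omega)
      _ < v := hmid
  | case2 lo hi h mid hmid ih =>
    intro hhi hlohi hlow hhigh
    simp only [show mid = (lo + hi) / 2 from rfl] at hmid ih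
    rw [pvBisectLeft, dif_pos h]
    simp only []
    rw [if_neg hmid]
    refine ih (by omega) (by omega) hlow ?_
    intro i hi1 hi2
    calc v ≤ xs.getD ((lo + hi) / 2) 0 := by omega
      _ ≤ xs.getD i 0 := sorted_getD_mono xs hs (by omega) hi2
  | case3 lo hi h =>
    intro hhi hlohi hlow hhigh
    rw [pvBisectLeft, dif_neg h]
    exact ⟨by omega, hlow, fun h2 => hhigh lo (by omega) h2⟩

theorem linSpec_char (xs : List Int) (v : Int) :
    ∀ k : Nat, k ≤ xs.length →
      (∀ i : Nat, i < k → i < xs.length → xs.getD i 0 < v) →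
      (k < xs.length → v ≤ xs.getD k 0) →
      linSpec xs v = if k < xs.length then xs.getD k 0 else v := by
  induction xs with
  | nil =>
    intro k hk _ _
    simp [linSpec]
  | cons a rest ih =>
    intro k hk hlow hat
    match k with
    | 0 =>
      rw [if_pos (by simp)]
      simp only [List.getD_cons_zero] at hat ⊢
      rw [linSpec, if_pos (hat (by simp))]
    | k' + 1 =>
      have ha : a < v := by
        have := hlow 0 (by omega) (by simp)
        simpa using this
      rw [linSpec, if_neg (by omega)]
      have hlen : k' ≤ rest.length := by simp at hk; omega
      have := ih k' hlen
        (fun i h1 h2 => by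
          have := hlow (i + 1) (by omega) (by simp; omega)
          simpa using this)
        (fun h => by
          have := hat (by simp; omega)
          simpa using this)
      rw [this]
      by_cases hlt : k' < rest.length
      · rw [if_pos hlt, if_pos (by simp; omega), List.getD_cons_succ]
      · rw [if_neg hlt, if_neg (by simp; omega)]

theorem pickB_eq_linSpec (xs : List Int) (v : Int) (hs : xs.Pairwise (· ≤ ·)) :
    pvPickB xs v = linSpec xs v := by
  obtain ⟨h1, h2, h3⟩ := bisect_inv xs v hs 0 xs.length (le_refl _) (by omega)
    (fun i h _ => by omega) (fun i h1 h2 => by omega)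
  rw [pvPickB, linSpec_char xs v (pvBisectLeft xs v 0 xs.length) h1 h2 h3]

theorem pickA_eq_linSpec (xs : List Int) (v : Int) (hx : xs ≠ []) :
    (if v > xs.getD (pvScanA xs v 0) 0 then v else xs.getD (pvScanA xs v 0) 0)
      = linSpec xs v := by
  have := scanA_pick xs v 0 (by cases xs <;> simp_all)
  simpa using this

-- ===== VERDICT (by name: the statement is the Claim_ definition above) =====
theorem parse_standard_resolution_spec : Claim_equal_parse_standard_resolution := by
  intro x y _
  unfold Spec_parse_standard_resolution parse_standard_resolution parse_standard_resolution_alt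
  refine Prod.ext ?_ ?_
  · exact (pickA_eq_linSpec _ x (by simp)).trans (pickB_eq_linSpec _ x (by decide)).symm
  · exact (pickA_eq_linSpec _ y (by simp)).trans (pickB_eq_linSpec _ y (by decide)).symm
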